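-- pv_equiv track=rewrite | github.com/benoit-bernard/rag-container | backend/app/services/qa/qa_service.py | _compare_registries
-- ===== SOURCE A (Python) =====
-- from typing import Dict, Any, List, Optional
--
-- def _compare_registries(current: Dict, cached: Dict) -> bool:
--     """Compare if document registries are the same"""
--     if set(current.keys()) != set(cached.keys()):
--         return False
--
--     for key in current.keys():
--         if key not in cached:
--             return False
--         if (current[key].get('mtime') != cached[key].get('mtime') or
--             current[key].get('size') != cached[key].get('size')):
--             return False
--     return True
-- ===== SOURCE B (Python) =====
-- def _compare_registries(current, cached):
--     """Compare if document registries are the same"""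
--     def signature(reg):
--         return sorted(((k, v.get('mtime'), v.get('size')) for k, v in reg.items()),
--                       key=lambda t: t[0])
--     return signature(current) == signature(cached)
-- ===== Notes on version B (the rewrite author's own statement) =====
-- stated objective: alternative
-- what changed: Replaces A's key-set comparison plus early-return per-key lookup loop by canonicalizing each registry into a key-sorted list of (key, mtime, size) triples and comparing the two sorted lists once; correct because keys are unique, so the sorted canonical forms are equal exactly when the key sets and per-key fields agree.
import Mathlib
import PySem

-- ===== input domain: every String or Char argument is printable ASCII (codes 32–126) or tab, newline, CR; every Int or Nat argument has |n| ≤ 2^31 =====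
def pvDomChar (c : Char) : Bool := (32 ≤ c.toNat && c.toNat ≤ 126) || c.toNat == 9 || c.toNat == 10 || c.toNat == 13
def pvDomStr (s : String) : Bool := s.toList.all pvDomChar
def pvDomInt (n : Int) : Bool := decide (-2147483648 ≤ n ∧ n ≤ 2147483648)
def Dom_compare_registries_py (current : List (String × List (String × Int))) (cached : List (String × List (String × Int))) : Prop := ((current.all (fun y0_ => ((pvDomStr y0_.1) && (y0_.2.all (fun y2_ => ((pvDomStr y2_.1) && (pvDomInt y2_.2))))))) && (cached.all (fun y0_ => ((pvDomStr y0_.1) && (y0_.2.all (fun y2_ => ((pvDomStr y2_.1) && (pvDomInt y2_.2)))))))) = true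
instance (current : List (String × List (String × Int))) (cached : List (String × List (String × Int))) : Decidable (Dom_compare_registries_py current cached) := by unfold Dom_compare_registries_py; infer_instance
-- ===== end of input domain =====

-- B replaces A's key-set comparison plus early-return per-key lookup loop by canonicalizing each
-- registry into a key-sorted list of (key, mtime, size) triples and comparing the sorted lists once
-- (objective: alternative — sort-and-compare instead of membership-and-lookup).

-- ===== PORT A =====
-- shared input marshalling: the association lists stand for Python dicts (later duplicate key wins)
def regOf (xs : List (String × List (String × Int))) : PySem.Dict String (PySem.Dict String Int) :=
  PySem.Dict.ofList (xs.map (fun p => (p.1, PySem.Dict.ofList p.2)))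

-- A's 'for key in current.keys(): …' loop with its two early returns
def aLoop (cur cach : PySem.Dict String (PySem.Dict String Int)) : List String → Bool
  | [] => true
  | k :: rest =>
    if ¬ (cach.contains k) then false
    else if ((cur.getD k PySem.Dict.empty).get? "mtime" ≠ (cach.getD k PySem.Dict.empty).get? "mtime")
         ∨ ((cur.getD k PySem.Dict.empty).get? "size" ≠ (cach.getD k PySem.Dict.empty).get? "size") then false
    else aLoop cur cach rest

def compare_registries_py (current : List (String × List (String × Int))) (cached : List (String × List (String × Int))) : Bool :=
  let cur := regOf current
  let cach := regOf cached
  if ¬ PySem.Set.equal (PySem.Set.ofList cur.keys) (PySem.Set.ofList cach.keys) then false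
  else aLoop cur cach cur.keys

-- ===== PORT B =====
-- Source B's '(k, v.get('mtime'), v.get('size'))'
def profilePair (v : PySem.Dict String Int) : Option Int × Option Int := (v.get? "mtime", v.get? "size")

-- Source B's 'sorted(((k, v.get('mtime'), v.get('size')) for k, v in reg.items()), key=lambda t: t[0])'
def signatureOf (d : PySem.Dict String (PySem.Dict String Int)) : List (String × Option Int × Option Int) :=
  PySem.List.sorted (d.items.map (fun p => (p.1, profilePair p.2))) (fun t => t.1) false

def compare_registries_py_alt (current : List (String × List (String × Int))) (cached : List (String × List (String × Int))) : Bool :=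
  signatureOf (regOf current) == signatureOf (regOf cached)

-- ===== PRECONDITION & SPEC =====
def Spec_compare_registries_py (current : List (String × List (String × Int))) (cached : List (String × List (String × Int))) (out : Bool) : Prop := out = compare_registries_py_alt current cached
instance (current : List (String × List (String × Int))) (cached : List (String × List (String × Int))) (out : Bool) : Decidable (Spec_compare_registries_py current cached out) := by unfold Spec_compare_registries_py; infer_instance

-- ===== CLAIM (what is proved, stated in full; the proofs are below) =====
def Claim_equal_compare_registries_py : Prop := ∀ (current : List (String × List (String × Int))) (cached : List (String × List (String × Int))), Dom_compare_registries_py current cached → Spec_compare_registries_py current cached (compare_registries_py current cached)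

-- ===== LEMMAS AND PROOFS =====

-- proof-only view of a registry: its {key: (mtime, size)} projection as a Dict
def profileOf (d : PySem.Dict String (PySem.Dict String Int)) : PySem.Dict String (Option Int × Option Int) :=
  PySem.Dict.mk (d.items.map (fun p => (p.1, profilePair p.2)))

theorem sig_eq (d : PySem.Dict String (PySem.Dict String Int)) :
    signatureOf d = PySem.List.sorted (profileOf d).items (fun t => t.1) false := rfl

theorem profile_keys (d : PySem.Dict String (PySem.Dict String Int)) : (profileOf d).keys = d.keys := by
  simp [profileOf, PySem.Dict.keys]

theorem profile_get? (d : PySem.Dict String (PySem.Dict String Int)) (k : String) :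
    (profileOf d).get? k = (d.get? k).map profilePair := by
  simp [profileOf, PySem.Dict.get?, List.find?_map]
  rfl

theorem aLoop_eq_all (cur cach : PySem.Dict String (PySem.Dict String Int)) (ks : List String) :
    aLoop cur cach ks = ks.all (fun k =>
      cach.contains k &&
      ((cur.getD k PySem.Dict.empty).get? "mtime" == (cach.getD k PySem.Dict.empty).get? "mtime") &&
      ((cur.getD k PySem.Dict.empty).get? "size" == (cach.getD k PySem.Dict.empty).get? "size")) := by
  induction ks with
  | nil => rfl
  | cons k rest ih =>
    simp only [aLoop, List.all_cons, ih]
    by_cases hc : cach.contains k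
    · by_cases hm : (cur.getD k PySem.Dict.empty).get? "mtime" = (cach.getD k PySem.Dict.empty).get? "mtime"
      · by_cases hs : (cur.getD k PySem.Dict.empty).get? "size" = (cach.getD k PySem.Dict.empty).get? "size"
        · simp [hc, hm, hs]
        · simp [hc, hm, hs]
      · simp [hc, hm]
    · simp [hc]

theorem pointwise (cur cach : PySem.Dict String (PySem.Dict String Int)) (k : String)
    (hk : k ∈ cur.keys) :
    (cach.contains k &&
      ((cur.getD k PySem.Dict.empty).get? "mtime" == (cach.getD k PySem.Dict.empty).get? "mtime") &&
      ((cur.getD k PySem.Dict.empty).get? "size" == (cach.getD k PySem.Dict.empty).get? "size"))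
    = ((profileOf cur).get? k == (profileOf cach).get? k) := by
  have hmem : cur.contains k := by
    rw [PySem.Dict.contains_iff_mem_keys]; exact hk
  rw [PySem.Dict.contains_eq_isSome_get?] at hmem
  obtain ⟨v, hv⟩ := Option.isSome_iff_exists.mp hmem
  rw [profile_get?, profile_get?, hv]
  cases h : cach.get? k with
  | none =>
    have hc : cach.contains k = false := by
      rw [PySem.Dict.contains_eq_isSome_get?, h]; rfl
    simp [hc]
  | some w =>
    have hc : cach.contains k = true := by
      rw [PySem.Dict.contains_eq_isSome_get?, h]; rfl
    simp only [hc, PySem.Dict.getD, hv, h, Option.getD_some, Option.map_some, profilePair, Bool.true_and]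
    rfl

theorem all_congr_mem {α : Type} {l : List α} {f g : α → Bool}
    (h : ∀ x ∈ l, f x = g x) : l.all f = l.all g := by
  induction l with
  | nil => rfl
  | cons x t ih =>
    simp only [List.all_cons, h x (by simp), ih (fun y hy => h y (by simp [hy]))]

-- sorted-by-key canonical forms of two nodup-keyed association lists are equal iff the lists are permutations
theorem sorted_assoc_eq_iff {V : Type} [DecidableEq V] (l1 l2 : List (String × V))
    (h1 : (l1.map Prod.fst).Nodup) :
    (PySem.List.sorted l1 (fun t => t.1) false = PySem.List.sorted l2 (fun t => t.1) false) ↔ l1.Perm l2 := by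
  constructor
  · intro h
    exact ((PySem.List.sorted_perm l1 (fun t => t.1) false).symm.trans
      (h ▸ PySem.List.sorted_perm l2 (fun t => t.1) false))
  · intro hp
    have hperm1 : (PySem.List.sorted l1 (fun t => t.1) false).Perm l1 :=
      PySem.List.sorted_perm l1 (fun t => t.1) false
    have hle : (PySem.List.sorted l1 (fun t => t.1) false).Pairwise (fun a b => a.1 ≤ b.1) :=
      PySem.List.sorted_pairwise l1 (fun t => t.1)
    have hnd : ((PySem.List.sorted l1 (fun t => t.1) false).map Prod.fst).Nodup :=
      (hperm1.map Prod.fst).nodup_iff.mpr h1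
    have hne : (PySem.List.sorted l1 (fun t => t.1) false).Pairwise (fun a b => a.1 ≠ b.1) :=
      (List.pairwise_map).mp hnd
    have hlt : (PySem.List.sorted l1 (fun t => t.1) false).Pairwise (fun a b => a.1 < b.1) :=
      (hle.and hne).imp (fun h => lt_of_le_of_ne h.1 h.2)
    exact (PySem.List.sorted_eq_of_perm_of_pairwise_lt l2 _ (fun t => t.1) (hperm1.trans hp) hlt).symm

-- items of two nodup-keyed dicts are permutations iff key sets and lookups agree
theorem perm_items_iff {V : Type} [DecidableEq V] (p q : PySem.Dict String V)
    (h1 : p.keys.Nodup) (h2 : q.keys.Nodup) :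
    p.items.Perm q.items ↔ ((∀ k, k ∈ p.keys ↔ k ∈ q.keys) ∧ ∀ k ∈ p.keys, p.get? k = q.get? k) := by
  have hpk : p.keys = p.items.map Prod.fst := by simp [PySem.Dict.keys]
  have hqk : q.keys = q.items.map Prod.fst := by simp [PySem.Dict.keys]
  constructor
  · intro hp
    constructor
    · intro k
      rw [hpk, hqk]
      exact (hp.map Prod.fst).mem_iff
    · intro k hk
      have hsome : (p.get? k).isSome := by
        rw [← PySem.Dict.contains_eq_isSome_get?, PySem.Dict.contains_iff_mem_keys]; exact hk
      obtain ⟨v, hv⟩ := Option.isSome_iff_exists.mp hsome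
      have hmem : (k, v) ∈ p.items := PySem.Dict.mem_items_of_get?_eq_some p hv
      have hmem2 : (k, v) ∈ q.items := hp.mem_iff.mp hmem
      rw [hv, (q.get?_eq_some_iff_mem_items k v h2).mpr hmem2]
  · intro ⟨hks, hgs⟩
    have hnd1 : p.items.Nodup := List.Nodup.of_map Prod.fst (hpk ▸ h1)
    have hnd2 : q.items.Nodup := List.Nodup.of_map Prod.fst (hqk ▸ h2)
    rw [List.perm_ext_iff_of_nodup hnd1 hnd2]
    intro ⟨k, v⟩
    constructor
    · intro hm
      have hk : k ∈ p.keys := by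
        rw [hpk]; exact List.mem_map_of_mem hm
      have h : p.get? k = some v := (p.get?_eq_some_iff_mem_items k v h1).mpr hm
      rw [hgs k hk] at h
      exact (q.get?_eq_some_iff_mem_items k v h2).mp h
    · intro hm
      have hkq : k ∈ q.keys := by
        rw [hqk]; exact List.mem_map_of_mem hm
      have hk : k ∈ p.keys := (hks k).mpr hkq
      have h : q.get? k = some v := (q.get?_eq_some_iff_mem_items k v h2).mpr hm
      rw [← hgs k hk] at h
      exact (p.get?_eq_some_iff_mem_items k v h1).mp h

theorem ports_agree (current cached : List (String × List (String × Int))) :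
    compare_registries_py current cached = compare_registries_py_alt current cached := by
  have hnd1 : (regOf current).keys.Nodup := PySem.Dict.nodup_keys_ofList _
  have hnd2 : (regOf cached).keys.Nodup := PySem.Dict.nodup_keys_ofList _
  have hpnd1 : (profileOf (regOf current)).keys.Nodup := by rw [profile_keys]; exact hnd1
  have hpnd2 : (profileOf (regOf cached)).keys.Nodup := by rw [profile_keys]; exact hnd2
  have hpmnd1 : ((profileOf (regOf current)).items.map Prod.fst).Nodup := by
    have : (profileOf (regOf current)).items.map Prod.fst = (profileOf (regOf current)).keys := by
      simp [PySem.Dict.keys]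
    rw [this]; exact hpnd1
  rw [Bool.eq_iff_iff]
  -- unfold B to the permutation condition
  have hB : compare_registries_py_alt current cached = true ↔
      ((∀ k, k ∈ (profileOf (regOf current)).keys ↔ k ∈ (profileOf (regOf cached)).keys) ∧
       ∀ k ∈ (profileOf (regOf current)).keys,
         (profileOf (regOf current)).get? k = (profileOf (regOf cached)).get? k) := by
    rw [← perm_items_iff _ _ hpnd1 hpnd2, ← sorted_assoc_eq_iff _ _ hpmnd1]
    unfold compare_registries_py_alt
    rw [sig_eq, sig_eq, beq_iff_eq]
  rw [hB]
  -- unfold A to the same condition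
  unfold compare_registries_py
  by_cases he : PySem.Set.equal (PySem.Set.ofList (regOf current).keys) (PySem.Set.ofList (regOf cached).keys)
  · rw [if_neg (by simp [he])]
    have hkeys : ∀ k, k ∈ (profileOf (regOf current)).keys ↔ k ∈ (profileOf (regOf cached)).keys := by
      intro k
      have := (PySem.Set.equal_iff _ _).mp he k
      simpa [PySem.Set.mem_ofList, profile_keys] using this
    rw [aLoop_eq_all]
    have hall : (regOf current).keys.all (fun k =>
        (regOf cached).contains k &&
        (((regOf current).getD k PySem.Dict.empty).get? "mtime" == ((regOf cached).getD k PySem.Dict.empty).get? "mtime") &&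
        (((regOf current).getD k PySem.Dict.empty).get? "size" == ((regOf cached).getD k PySem.Dict.empty).get? "size"))
        = (regOf current).keys.all (fun k => (profileOf (regOf current)).get? k == (profileOf (regOf cached)).get? k) :=
      all_congr_mem (fun k hk => pointwise (regOf current) (regOf cached) k hk)
    rw [hall]
    constructor
    · intro h
      refine ⟨hkeys, fun k hk => ?_⟩
      have := List.all_eq_true.mp h k (by rwa [profile_keys] at hk)
      exact beq_iff_eq.mp this
    · intro ⟨_, h⟩
      exact List.all_eq_true.mpr (fun k hk => beq_iff_eq.mpr (h k (by rwa [profile_keys])))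
  · rw [if_pos (by simpa using he)]
    constructor
    · intro h; exact absurd h (by simp)
    · intro ⟨hks, _⟩
      exfalso; apply he
      rw [PySem.Set.equal_iff]
      intro k
      have := hks k
      simpa [PySem.Set.mem_ofList, profile_keys] using this

-- ===== VERDICT (by name: the statement is the Claim_ definition above) =====
theorem compare_registries_py_spec : Claim_equal_compare_registries_py := by
  intro current cached _
  unfold Spec_compare_registries_py
  exact ports_agree current cached
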